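-- pv_equiv track=rewrite | github.com/byeonwoojung/Algorithm | 프로그래머스/3/388354. 홀짝트리/홀짝트리.py | solution
-- ===== SOURCE A (Python) =====
-- from collections import defaultdict, deque
--
-- def tree(graph, related_nodes):
--     odd_even_check = 0
--     reversed_odd_even_check = 0
--     for node in related_nodes:
--         # 홀수/짝수 노드인 개수
--         if (node % 2) == (len(graph[node]) % 2):
--             odd_even_check += 1
--         # 역홀수/역짝수 노드인 개수
--         elif (node % 2) == ((len(graph[node]) - 1) % 2):
--             reversed_odd_even_check += 1
--
--     # '홀짝 트리'는 루트(홀짝 일치)가 딱 1개여야 함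
--     # 나머지는 역홀짝이어야 실제 간선 1개 뺐을 때 홀짝이 됨
--     odd_even = 0
--     if odd_even_check == 1:
--         odd_even += 1
--
--     # '역홀짝 트리'는 역루트(홀짝 불일치)가 딱 1개여야 함
--     # 나머지는 홀짝이어야 실제 간선 1개 뺐을 때 역홀짝이 됨
--     reversed_odd_even = 0
--     if reversed_odd_even_check == 1:
--         reversed_odd_even += 1
--
--     return odd_even, reversed_odd_even
--
-- def bfs(node, graph, visited):
--     related_nodes = set()
--     queue = deque([node])
--     visited[node] = True
--
--     while queue:
--         q = queue.popleft()
--         for related in graph[q]: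
--             if visited[related] == False:
--                 related_nodes.add(related)
--                 queue.append(related)
--                 visited[related] = True
--
--     return related_nodes, visited
--
-- def solution(nodes, edges):
--     graph = defaultdict(list)
--     visited = defaultdict(bool)
--     answer = []
--
--     for node in nodes:
--         graph[node] = []
--         visited[node] = False
--     for edge in edges:
--         graph[edge[0]].append(edge[1])
--         graph[edge[1]].append(edge[0])
--
--     related_nodes_list = []
--     odd_even_count, reversed_odd_even_count = 0, 0
--     # 각 노드마다
--     for node in nodes:
--         # 아직 방문하지 않은 노드이면(트리에 들어가지 않은 노드)
--         if visited[node] == False: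
--             # 한 트리의 노드들
--             related_nodes, visited = bfs(node, graph, visited)
--             related_nodes.add(node)
--
--             odd_even, reversed_odd_even = tree(graph, related_nodes)
--             odd_even_count += odd_even
--             reversed_odd_even_count += reversed_odd_even
--
--     answer = [odd_even_count, reversed_odd_even_count]
--
--     return answer
-- ===== SOURCE B (Python) =====
-- def solution(nodes, edges):
--     # Union-find (quick-find) over edge endpoints instead of per-component BFS:
--     # components come from merging labels edge by edge, then one grouped scan
--     # over the graph's keys counts size and parity-matches per root.
--     graph = {v: [] for v in nodes}
--     for e in edges:
--         a, b = e[0], e[1]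
--         graph.setdefault(a, []).append(b)
--         graph.setdefault(b, []).append(a)
--
--     # label[v] is always v's current root (quick-find: unions relabel eagerly)
--     label = {v: v for v in graph}
--     for e in edges:
--         ra, rb = label[e[0]], label[e[1]]
--         if ra != rb:
--             label = {k: (ra if r == rb else r) for k, r in label.items()}
--
--     done = set()
--     odd_even_count = 0
--     reversed_odd_even_count = 0
--     for v in nodes:
--         r = label[v]
--         if r not in done:
--             done.add(r)
--             s = 0
--             m = 0
--             for k in graph:
--                 if label[k] == r:
--                     s += 1
--                     if k % 2 == len(graph[k]) % 2:
--                         m += 1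
--             if m == 1:
--                 odd_even_count += 1
--             if s - m == 1:
--                 reversed_odd_even_count += 1
--     return [odd_even_count, reversed_odd_even_count]
-- ===== Notes on version B (the rewrite author's own statement) =====
-- stated objective: alternative
-- what changed: B replaces A's per-component BFS (deque + visited dict + separate counting pass) with a quick-find union-find: labels are merged edge by edge, and a single grouped scan over the graph's keys by final root yields each component's size and parity-match count; reverse matches are size minus matches.
-- outside the precondition, e.g. on solution([1, 2], [[5]]): A raises IndexError, B raises IndexError
import Mathlib
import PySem

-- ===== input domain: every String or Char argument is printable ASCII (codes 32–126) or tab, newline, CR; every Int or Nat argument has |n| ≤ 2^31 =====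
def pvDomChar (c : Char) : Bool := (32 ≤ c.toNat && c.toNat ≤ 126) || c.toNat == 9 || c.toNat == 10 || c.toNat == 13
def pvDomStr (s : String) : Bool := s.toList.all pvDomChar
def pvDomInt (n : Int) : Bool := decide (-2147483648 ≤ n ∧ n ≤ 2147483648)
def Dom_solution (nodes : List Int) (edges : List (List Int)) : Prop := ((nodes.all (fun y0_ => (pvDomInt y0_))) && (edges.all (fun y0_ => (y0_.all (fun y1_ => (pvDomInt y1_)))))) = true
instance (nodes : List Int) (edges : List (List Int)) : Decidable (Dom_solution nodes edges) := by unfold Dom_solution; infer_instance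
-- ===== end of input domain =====

-- B replaces A's per-component BFS with a quick-find union-find over the edges
-- plus one grouped scan of the graph's keys per component root; same return value.

-- ===== PORT A =====

-- tree(graph, related_nodes): counts matching / reverse-matching nodes in the component
def pyTree (graph : PySem.Dict Int (List Int)) (related : List Int) : Int × Int :=
  let c := related.foldl (fun (p : Int × Int) node =>
    if PySem.Int.mod node 2 = PySem.Int.mod (((graph.getD node []).length : Int)) 2 then
      (p.1 + 1, p.2)
    else if PySem.Int.mod node 2 = PySem.Int.mod ((((graph.getD node []).length : Int)) - 1) 2 then
      (p.1, p.2 + 1)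
    else p) (0, 0)
  ((if c.1 = 1 then (1 : Int) else 0), (if c.2 = 1 then (1 : Int) else 0))

-- the 'while queue:' loop of bfs; fuel is a port artifact (the Python loop terminates
-- within nodes.length + 2*edges.length + 1 iterations, the fuel solution passes in)
def bfsLoopA (graph : PySem.Dict Int (List Int)) :
    Nat → List Int → PySem.Dict Int Bool → PySem.Set Int →
    PySem.Set Int × PySem.Dict Int Bool
  | 0, _, vis, rel => (rel, vis)
  | _ + 1, [], vis, rel => (rel, vis)
  | f + 1, q :: rest, vis, rel =>
    let st := (graph.getD q []).foldl
      (fun (st : PySem.Set Int × List Int × PySem.Dict Int Bool) r =>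
        if st.2.2.getD r false = false then
          (PySem.Set.add st.1 r, st.2.1 ++ [r], st.2.2.insert r true)
        else st)
      (rel, rest, vis)
    bfsLoopA graph f st.2.1 st.2.2 st.1

-- bfs(node, graph, visited)
def bfsA (fuel : Nat) (node : Int) (graph : PySem.Dict Int (List Int))
    (visited : PySem.Dict Int Bool) : PySem.Set Int × PySem.Dict Int Bool :=
  bfsLoopA graph fuel [node] (visited.insert node true) PySem.Set.empty

def solution (nodes : List Int) (edges : List (List Int)) : List Int :=
  let graph : PySem.Dict Int (List Int) :=
    nodes.foldl (fun g v => g.insert v []) PySem.Dict.empty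
  let visited : PySem.Dict Int Bool :=
    nodes.foldl (fun d v => d.insert v false) PySem.Dict.empty
  let graph := edges.foldl (fun g e =>
    match PySem.List.pyGet? e 0, PySem.List.pyGet? e 1 with
    | some a, some b => (g.modify a [] (· ++ [b])).modify b [] (· ++ [a])
    | _, _ => g   -- Python raises IndexError here (edge shorter than 2); excluded by Pre_solution
    ) graph
  let fuel := nodes.length + 2 * edges.length + 1
  let st := nodes.foldl (fun (st : PySem.Dict Int Bool × Int × Int) node =>
    if st.1.getD node false = false then
      let bv := bfsA fuel node graph st.1
      let rel := PySem.Set.add bv.1 node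
      let t := pyTree graph rel
      (bv.2, st.2.1 + t.1, st.2.2 + t.2)
    else st) (visited, 0, 0)
  [st.2.1, st.2.2]

-- ===== PORT B =====

def solution_alt (nodes : List Int) (edges : List (List Int)) : List Int :=
  let graph : PySem.Dict Int (List Int) :=
    PySem.Dict.ofList (nodes.map (fun v => (v, ([] : List Int))))
  let graph := edges.foldl (fun g e =>
    match PySem.List.pyGet? e 0 with
    | none => g   -- Python raises IndexError here; excluded by Pre_solution
    | some a =>
      match PySem.List.pyGet? e 1 with
      | none => g   -- Python raises IndexError here; excluded by Pre_solution
      | some b => ((g.setdefault a []).modify a [] (· ++ [b])).setdefault b [] |>.modify b [] (· ++ [a])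
    ) graph
  -- label = {v: v for v in graph}
  let label : PySem.Dict Int Int := PySem.Dict.ofList (graph.keys.map (fun v => (v, v)))
  let label := edges.foldl (fun lab e =>
    match PySem.List.pyGet? e 0 with
    | none => lab     -- Python raises IndexError here; excluded by Pre_solution
    | some a =>
      match PySem.List.pyGet? e 1 with
      | none => lab   -- Python raises IndexError here; excluded by Pre_solution
      | some b =>
        match lab.get? a with
        | none => lab   -- unreachable: every edge endpoint is a key of label
        | some ra =>
          match lab.get? b with
          | none => lab   -- unreachable: every edge endpoint is a key of label
          | some rb =>
            if ra ≠ rb then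
              PySem.Dict.ofList (lab.items.map (fun kv => (kv.1, if kv.2 = rb then ra else kv.2)))
            else lab
    ) label
  let st := nodes.foldl (fun (st : PySem.Set Int × Int × Int) v =>
    match label.get? v with
    | none => st   -- unreachable: every element of nodes is a key of label
    | some r =>
      if PySem.Set.contains st.1 r then st
      else
        let sm := graph.keys.foldl (fun (sm : Int × Int) k =>
          if label.get? k = some r then
            (sm.1 + 1, sm.2 + (if PySem.Int.mod k 2 = PySem.Int.mod (((graph.getD k []).length : Int)) 2 then 1 else 0))
          else sm) (0, 0)
        (PySem.Set.add st.1 r,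
         st.2.1 + (if sm.2 = 1 then (1 : Int) else 0),
         st.2.2 + (if sm.1 - sm.2 = 1 then (1 : Int) else 0))
    ) (PySem.Set.empty, 0, 0)
  [st.2.1, st.2.2]

-- ===== PRECONDITION & SPEC =====
-- Pre_ excludes exactly the inputs on which Python A raises IndexError: an edge with fewer than two entries.
def Pre_solution (nodes : List Int) (edges : List (List Int)) : Prop :=
  ∀ e ∈ edges, 2 ≤ e.length
instance (nodes : List Int) (edges : List (List Int)) : Decidable (Pre_solution nodes edges) := by
  unfold Pre_solution; infer_instance
def pvWitness_solution : List Int × List (List Int) := ([1, 2, 3], [[1, 2]])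

def Spec_solution (nodes : List Int) (edges : List (List Int)) (out : List Int) : Prop := out = solution_alt nodes edges
instance (nodes : List Int) (edges : List (List Int)) (out : List Int) : Decidable (Spec_solution nodes edges out) := by unfold Spec_solution; infer_instance

-- ===== CLAIM (what is proved, stated in full; the proofs are below) =====
def Claim_equal_solution : Prop := ∀ (nodes : List Int) (edges : List (List Int)), Dom_solution nodes edges → Pre_solution nodes edges → Spec_solution nodes edges (solution nodes edges)

-- ===== LEMMAS AND PROOFS =====

-- proof-only abbreviations for the graph both ports build ---------------------

def gInit (nodes : List Int) : PySem.Dict Int (List Int) :=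
  nodes.foldl (fun g v => g.insert v []) PySem.Dict.empty

def gBuild (nodes : List Int) (edges : List (List Int)) : PySem.Dict Int (List Int) :=
  edges.foldl (fun g e =>
    match PySem.List.pyGet? e 0, PySem.List.pyGet? e 1 with
    | some a, some b => (g.modify a [] (· ++ [b])).modify b [] (· ++ [a])
    | _, _ => g) (gInit nodes)

-- edge relation and connectivity ---------------------------------------------

def EAdj (edges : List (List Int)) (x y : Int) : Prop :=
  ∃ e ∈ edges, (PySem.List.pyGet? e 0 = some x ∧ PySem.List.pyGet? e 1 = some y) ∨
               (PySem.List.pyGet? e 0 = some y ∧ PySem.List.pyGet? e 1 = some x)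

def Conn (g : PySem.Dict Int (List Int)) (x y : Int) : Prop :=
  Relation.ReflTransGen (fun u w => w ∈ g.getD u []) x y

-- 0/1 indicator: node's parity matches its degree's parity
def mInd (g : PySem.Dict Int (List Int)) (w : Int) : Int :=
  if PySem.Int.mod w 2 = PySem.Int.mod (((g.getD w []).length : Int)) 2 then 1 else 0

-- number of matching nodes in a list
def cntM (g : PySem.Dict Int (List Int)) (l : List Int) : Int := (l.map (mInd g)).sum

-- the tree() counting pass (port A, reused lemmas) ----------------------------

lemma parity_compl (n d : Int) (h : ¬ PySem.Int.mod n 2 = PySem.Int.mod d 2) :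
    PySem.Int.mod n 2 = PySem.Int.mod (d - 1) 2 := by
  rw [PySem.Int.mod_eq_emod_of_pos (by norm_num)] at *
  rw [PySem.Int.mod_eq_emod_of_pos (by norm_num)] at h ⊢
  omega

lemma pyTree_fold (g : PySem.Dict Int (List Int)) (l : List Int) :
    ∀ a b : Int,
    l.foldl (fun (p : Int × Int) node =>
      if PySem.Int.mod node 2 = PySem.Int.mod (((g.getD node []).length : Int)) 2 then
        (p.1 + 1, p.2)
      else if PySem.Int.mod node 2 = PySem.Int.mod ((((g.getD node []).length : Int)) - 1) 2 then
        (p.1, p.2 + 1)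
      else p) (a, b)
    = (a + cntM g l, b + ((l.length : Int) - cntM g l)) := by
  induction l with
  | nil => intro a b; simp [cntM]
  | cons x xs ih =>
    intro a b
    by_cases h : PySem.Int.mod x 2 = PySem.Int.mod (((g.getD x []).length : Int)) 2
    · simp only [List.foldl_cons, if_pos h, ih]
      have : cntM g (x :: xs) = 1 + cntM g xs := by
        simp only [cntM, mInd, List.map_cons, List.sum_cons, if_pos h]
      rw [this]
      simp only [Prod.mk.injEq, List.length_cons]
      push_cast
      constructor <;> ring
    · have h2 := parity_compl x _ h
      simp only [List.foldl_cons, if_neg h, if_pos h2, ih]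
      have : cntM g (x :: xs) = 0 + cntM g xs := by
        simp only [cntM, mInd, List.map_cons, List.sum_cons, if_neg h]
      rw [this]
      simp only [Prod.mk.injEq, List.length_cons]
      push_cast
      constructor <;> ring

lemma pyTree_eq (g : PySem.Dict Int (List Int)) (l : List Int) :
    pyTree g l = ((if cntM g l = 1 then (1 : Int) else 0),
                  (if (l.length : Int) - cntM g l = 1 then (1 : Int) else 0)) := by
  unfold pyTree
  rw [pyTree_fold]
  simp

-- both ports build the same adjacency dict ------------------------------------

lemma setdefault_modify (d : PySem.Dict Int (List Int)) (k : Int) (f : List Int → List Int) :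
    (d.setdefault k []).modify k [] f = d.modify k [] f := by
  by_cases hc : d.contains k = true
  · rw [PySem.Dict.setdefault_of_contains d [] hc]
  · have hc' : d.contains k = false := by revert hc; cases d.contains k <;> simp
    rw [PySem.Dict.setdefault_of_not_contains d [] hc']
    show (d.insert k []).insert k (f ((d.insert k []).getD k []))
        = d.insert k (f (d.getD k []))
    rw [PySem.Dict.getD_insert_self, PySem.Dict.insert_insert_self,
        PySem.Dict.getD_of_not_contains d [] hc']

lemma graph_build_eq (nodes : List Int) (edges : List (List Int)) :
    edges.foldl (fun g e =>
      match PySem.List.pyGet? e 0 with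
      | none => g
      | some a =>
        match PySem.List.pyGet? e 1 with
        | none => g
        | some b => ((g.setdefault a []).modify a [] (· ++ [b])).setdefault b [] |>.modify b [] (· ++ [a]))
      (PySem.Dict.ofList (nodes.map (fun v => (v, ([] : List Int)))))
    = gBuild nodes edges := by
  have hinit : PySem.Dict.ofList (nodes.map (fun v => (v, ([] : List Int))))
      = gInit nodes := by
    show PySem.Dict.update PySem.Dict.empty (nodes.map (fun v => (v, ([] : List Int)))) = _
    rw [PySem.Dict.update, List.foldl_map]
    rfl
  rw [hinit]
  apply PySem.List.foldl_congr_mem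
  intro g e _
  cases h0 : PySem.List.pyGet? e 0 with
  | none => rfl
  | some a =>
    cases h1 : PySem.List.pyGet? e 1 with
    | none => rfl
    | some b =>
      simp only
      rw [setdefault_modify, setdefault_modify]

-- adjacency characterization of gBuild ----------------------------------------

lemma gInit_getD (ns : List Int) :
    ∀ (d : PySem.Dict Int (List Int)), (∀ x, d.getD x [] = []) →
    ∀ x, (ns.foldl (fun g v => g.insert v []) d).getD x [] = [] := by
  induction ns with
  | nil => intro d h x; exact h x
  | cons v ns ih =>
    intro d h x
    simp only [List.foldl_cons]
    apply ih
    intro y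
    rw [PySem.Dict.getD_insert]
    by_cases hy : y = v
    · simp [hy]
    · simp [hy, h y]

lemma mem_buildStep (g : PySem.Dict Int (List Int)) (e : List Int) (x y : Int) :
    y ∈ ((match PySem.List.pyGet? e 0, PySem.List.pyGet? e 1 with
      | some a, some b => (g.modify a [] (· ++ [b])).modify b [] (· ++ [a])
      | _, _ => g) : PySem.Dict Int (List Int)).getD x []
    ↔ y ∈ g.getD x [] ∨ (PySem.List.pyGet? e 0 = some x ∧ PySem.List.pyGet? e 1 = some y) ∨
        (PySem.List.pyGet? e 0 = some y ∧ PySem.List.pyGet? e 1 = some x) := by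
  cases h0 : PySem.List.pyGet? e 0 with
  | none => simp
  | some a =>
    cases h1 : PySem.List.pyGet? e 1 with
    | none => simp
    | some b =>
      simp only [PySem.Dict.getD_modify, Option.some.injEq]
      split_ifs <;> simp_all [List.mem_append, eq_comm]

lemma mem_buildFold (es : List (List Int)) :
    ∀ (g0 : PySem.Dict Int (List Int)) (x y : Int),
    y ∈ (es.foldl (fun g e =>
      match PySem.List.pyGet? e 0, PySem.List.pyGet? e 1 with
      | some a, some b => (g.modify a [] (· ++ [b])).modify b [] (· ++ [a])
      | _, _ => g) g0).getD x []
    ↔ y ∈ g0.getD x [] ∨ EAdj es x y := by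
  induction es with
  | nil => intro g0 x y; simp [EAdj]
  | cons e es ih =>
    intro g0 x y
    rw [List.foldl_cons, ih, mem_buildStep]
    simp only [EAdj, List.mem_cons, exists_eq_or_imp]
    rw [or_assoc]

lemma mem_gBuild (nodes : List Int) (edges : List (List Int)) (x y : Int) :
    y ∈ (gBuild nodes edges).getD x [] ↔ EAdj edges x y := by
  unfold gBuild
  rw [mem_buildFold]
  unfold gInit
  rw [gInit_getD nodes PySem.Dict.empty (fun x => PySem.Dict.getD_empty x [])]
  simp

lemma mem_keys_modify (d : PySem.Dict Int (List Int)) (k x : Int) (d0 : List Int)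
    (f : List Int → List Int) :
    x ∈ (d.modify k d0 f).keys ↔ x = k ∨ x ∈ d.keys := by
  rw [PySem.Dict.keys_modify]
  exact PySem.Dict.mem_keys_insert _ _ _ _

lemma mem_keys_buildStep (g : PySem.Dict Int (List Int)) (e : List Int) (x : Int)
    (h : x ∈ g.keys) :
    x ∈ ((match PySem.List.pyGet? e 0, PySem.List.pyGet? e 1 with
      | some a, some b => (g.modify a [] (· ++ [b])).modify b [] (· ++ [a])
      | _, _ => g) : PySem.Dict Int (List Int)).keys := by
  cases h0 : PySem.List.pyGet? e 0 with
  | none => simpa using h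
  | some a =>
    cases h1 : PySem.List.pyGet? e 1 with
    | none => simpa using h
    | some b =>
      simp only
      rw [mem_keys_modify, mem_keys_modify]
      tauto

lemma nodup_keys_modify (d : PySem.Dict Int (List Int)) (k : Int) (d0 : List Int)
    (f : List Int → List Int) (h : d.keys.Nodup) : (d.modify k d0 f).keys.Nodup := by
  rw [PySem.Dict.keys_modify]
  exact PySem.Dict.nodup_keys_insert _ _ _ h

lemma nodup_keys_gBuild (nodes : List Int) (edges : List (List Int)) :
    (gBuild nodes edges).keys.Nodup := by
  unfold gBuild
  have hinit : (gInit nodes).keys.Nodup :=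
    PySem.Dict.nodup_keys_foldl_insert nodes (fun _ _ => ([] : List Int)) PySem.Dict.empty
      PySem.Dict.nodup_keys_empty
  revert hinit
  generalize gInit nodes = g0
  induction edges generalizing g0 with
  | nil => intro h; exact h
  | cons e es ih =>
    intro h
    rw [List.foldl_cons]
    apply ih
    cases h0 : PySem.List.pyGet? e 0 with
    | none => simpa using h
    | some a =>
      cases h1 : PySem.List.pyGet? e 1 with
      | none => simpa using h
      | some b =>
        simp only
        exact nodup_keys_modify _ _ _ _ (nodup_keys_modify _ _ _ _ h)

lemma adj_symm (nodes : List Int) (edges : List (List Int)) (x y : Int)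
    (h : y ∈ (gBuild nodes edges).getD x []) : x ∈ (gBuild nodes edges).getD y [] := by
  rw [mem_gBuild] at *
  obtain ⟨e, he, h⟩ := h
  exact ⟨e, he, h.symm.imp id id⟩

lemma conn_symm (nodes : List Int) (edges : List (List Int)) (x y : Int)
    (h : Conn (gBuild nodes edges) x y) : Conn (gBuild nodes edges) y x := by
  induction h with
  | refl => exact Relation.ReflTransGen.refl
  | tail _ hadj ih =>
    exact Relation.ReflTransGen.trans
      (Relation.ReflTransGen.single (adj_symm nodes edges _ _ hadj)) ih

lemma mem_keys_of_getD_mem (d : PySem.Dict Int (List Int)) (x y : Int)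
    (h : y ∈ d.getD x []) : x ∈ d.keys := by
  by_contra hx
  have hc : d.contains x = false := by
    cases hcc : d.contains x
    · rfl
    · exact absurd ((PySem.Dict.contains_iff_mem_keys d x).mp hcc) hx
  rw [PySem.Dict.getD_of_not_contains d [] hc] at h
  exact absurd h (List.not_mem_nil)

lemma endpoint_mem_keys (nodes : List Int) (edges : List (List Int)) (a b : Int)
    (h : EAdj edges a b) : a ∈ (gBuild nodes edges).keys :=
  mem_keys_of_getD_mem _ a b ((mem_gBuild nodes edges a b).mpr h)

lemma node_mem_keys (nodes : List Int) (edges : List (List Int)) (c : Int)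
    (hc : c ∈ nodes) : c ∈ (gBuild nodes edges).keys := by
  unfold gBuild
  have hmono : ∀ (es : List (List Int)) (g0 : PySem.Dict Int (List Int)) (x : Int),
      x ∈ g0.keys →
      x ∈ (es.foldl (fun g e =>
        match PySem.List.pyGet? e 0, PySem.List.pyGet? e 1 with
        | some a, some b => (g.modify a [] (· ++ [b])).modify b [] (· ++ [a])
        | _, _ => g) g0).keys := by
    intro es
    induction es with
    | nil => intro g0 x h; exact h
    | cons e es ih =>
      intro g0 x h
      rw [List.foldl_cons]
      exact ih _ _ (mem_keys_buildStep g0 e x h)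
  apply hmono
  unfold gInit
  rw [PySem.Dict.keys_foldl_insert nodes (fun _ _ => ([] : List Int)) PySem.Dict.empty]
  exact (PySem.Set.mem_update _ _ _).mpr (Or.inr hc)

lemma conn_mem_keys (nodes : List Int) (edges : List (List Int)) (c x : Int)
    (hc : c ∈ nodes) (h : Conn (gBuild nodes edges) c x) :
    x ∈ (gBuild nodes edges).keys := by
  induction h with
  | refl => exact node_mem_keys nodes edges c hc
  | tail _ hadj _ =>
    exact mem_keys_of_getD_mem _ _ _ (adj_symm nodes edges _ _ hadj)

-- the endpoint universe and the BFS potential ---------------------------------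

def EndPts (edges : List (List Int)) : Finset Int :=
  ((edges.filterMap (fun e => PySem.List.pyGet? e 0)) ++
   (edges.filterMap (fun e => PySem.List.pyGet? e 1))).toFinset

def unmarked (edges : List (List Int)) (vis : PySem.Dict Int Bool) : Nat :=
  ((EndPts edges).filter (fun x => vis.getD x false = false)).card

lemma adj_mem_endPts (nodes : List Int) (edges : List (List Int)) (x y : Int)
    (h : y ∈ (gBuild nodes edges).getD x []) : y ∈ EndPts edges := by
  rw [mem_gBuild] at h
  obtain ⟨e, he, hcase⟩ := h
  unfold EndPts
  rw [List.mem_toFinset, List.mem_append]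
  rcases hcase with ⟨_, h1⟩ | ⟨h0, _⟩
  · exact Or.inr (List.mem_filterMap.mpr ⟨e, he, h1⟩)
  · exact Or.inl (List.mem_filterMap.mpr ⟨e, he, h0⟩)

lemma unmarked_le (edges : List (List Int)) (vis : PySem.Dict Int Bool) :
    unmarked edges vis ≤ 2 * edges.length := by
  have h1 : unmarked edges vis ≤ (EndPts edges).card := Finset.card_filter_le _ _
  have h2 := List.toFinset_card_le
    ((edges.filterMap (fun e => PySem.List.pyGet? e 0)) ++
     (edges.filterMap (fun e => PySem.List.pyGet? e 1)))
  have h3 := List.length_filterMap_le (fun e => PySem.List.pyGet? e 0) edges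
  have h4 := List.length_filterMap_le (fun e => PySem.List.pyGet? e 1) edges
  rw [List.length_append] at h2
  unfold EndPts at h1
  omega

lemma unmarked_insert_le (edges : List (List Int)) (vis : PySem.Dict Int Bool) (v : Int) :
    unmarked edges (vis.insert v true) ≤ unmarked edges vis := by
  apply Finset.card_le_card
  intro x hx
  simp only [Finset.mem_filter] at *
  refine ⟨hx.1, ?_⟩
  have h := hx.2
  rw [PySem.Dict.getD_insert] at h
  by_cases hxv : x = v
  · simp [hxv] at h
  · simpa [hxv] using h

lemma unmarked_insert_true (edges : List (List Int)) (vis : PySem.Dict Int Bool) (y : Int)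
    (hy : y ∈ EndPts edges) (hv : vis.getD y false = false) :
    unmarked edges (vis.insert y true) + 1 = unmarked edges vis := by
  have key : (EndPts edges).filter (fun x => (vis.insert y true).getD x false = false)
      = ((EndPts edges).filter (fun x => vis.getD x false = false)).erase y := by
    ext x
    simp only [Finset.mem_filter, Finset.mem_erase, PySem.Dict.getD_insert]
    by_cases hxy : x = y
    · simp [hxy]
    · simp [hxy]
  rw [unmarked, unmarked, key,
    Finset.card_erase_of_mem (by simp [Finset.mem_filter, hy, hv])]
  have hpos : 0 < ((EndPts edges).filter fun x => vis.getD x false = false).card :=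
    Finset.card_pos.mpr ⟨y, by simp [Finset.mem_filter, hy, hv]⟩
  omega

-- the BFS loop invariant ------------------------------------------------------

def BfsInv (g : PySem.Dict Int (List Int)) (vis0 : PySem.Dict Int Bool) (c : Int)
    (queue : List Int) (vis : PySem.Dict Int Bool) (rel : PySem.Set Int) : Prop :=
  rel.Nodup ∧
  (∀ x, vis.getD x false = true ↔ (vis0.getD x false = true ∨ x = c ∨ x ∈ rel)) ∧
  c ∉ rel ∧
  (∀ x ∈ rel, Conn g c x ∧ vis0.getD x false = false) ∧
  queue.Nodup ∧ (∀ x ∈ queue, x = c ∨ x ∈ rel) ∧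
  (∀ x, (x = c ∨ x ∈ rel) → x ∉ queue → ∀ y ∈ g.getD x [], vis.getD y false = true)

-- inner-fold invariant: the state while the neighbours of the popped node q are scanned
def InnerInv (g : PySem.Dict Int (List Int)) (vis0 : PySem.Dict Int Bool) (c q : Int)
    (rel : PySem.Set Int) (qu : List Int) (vis : PySem.Dict Int Bool) : Prop :=
  rel.Nodup ∧
  (∀ x, vis.getD x false = true ↔ (vis0.getD x false = true ∨ x = c ∨ x ∈ rel)) ∧
  c ∉ rel ∧
  (∀ x ∈ rel, Conn g c x ∧ vis0.getD x false = false) ∧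
  qu.Nodup ∧ (∀ x ∈ qu, x = c ∨ x ∈ rel) ∧
  q ∉ qu ∧ (q = c ∨ q ∈ rel) ∧
  (∀ x, (x = c ∨ x ∈ rel) → x ∉ qu → x ≠ q → ∀ y ∈ g.getD x [], vis.getD y false = true)

lemma bfs_inner (nodes : List Int) (edges : List (List Int)) (vis0 : PySem.Dict Int Bool)
    (c q : Int) (L : List Int)
    (hL : ∀ y ∈ L, y ∈ (gBuild nodes edges).getD q [])
    (hq : Conn (gBuild nodes edges) c q) :
    ∀ (rel : PySem.Set Int) (qu : List Int) (vis : PySem.Dict Int Bool),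
    InnerInv (gBuild nodes edges) vis0 c q rel qu vis →
    InnerInv (gBuild nodes edges) vis0 c q
      (L.foldl (fun (st : PySem.Set Int × List Int × PySem.Dict Int Bool) r =>
        if st.2.2.getD r false = false then
          (PySem.Set.add st.1 r, st.2.1 ++ [r], st.2.2.insert r true)
        else st) (rel, qu, vis)).1
      (L.foldl (fun (st : PySem.Set Int × List Int × PySem.Dict Int Bool) r =>
        if st.2.2.getD r false = false then
          (PySem.Set.add st.1 r, st.2.1 ++ [r], st.2.2.insert r true)
        else st) (rel, qu, vis)).2.1
      (L.foldl (fun (st : PySem.Set Int × List Int × PySem.Dict Int Bool) r =>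
        if st.2.2.getD r false = false then
          (PySem.Set.add st.1 r, st.2.1 ++ [r], st.2.2.insert r true)
        else st) (rel, qu, vis)).2.2 ∧
    (∀ y ∈ L, (L.foldl (fun (st : PySem.Set Int × List Int × PySem.Dict Int Bool) r =>
        if st.2.2.getD r false = false then
          (PySem.Set.add st.1 r, st.2.1 ++ [r], st.2.2.insert r true)
        else st) (rel, qu, vis)).2.2.getD y false = true) ∧
    ((L.foldl (fun (st : PySem.Set Int × List Int × PySem.Dict Int Bool) r =>
        if st.2.2.getD r false = false then
          (PySem.Set.add st.1 r, st.2.1 ++ [r], st.2.2.insert r true)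
        else st) (rel, qu, vis)).2.1.length +
      unmarked edges (L.foldl (fun (st : PySem.Set Int × List Int × PySem.Dict Int Bool) r =>
        if st.2.2.getD r false = false then
          (PySem.Set.add st.1 r, st.2.1 ++ [r], st.2.2.insert r true)
        else st) (rel, qu, vis)).2.2
      = qu.length + unmarked edges vis) ∧
    (∀ x, vis.getD x false = true →
      (L.foldl (fun (st : PySem.Set Int × List Int × PySem.Dict Int Bool) r =>
        if st.2.2.getD r false = false then
          (PySem.Set.add st.1 r, st.2.1 ++ [r], st.2.2.insert r true)
        else st) (rel, qu, vis)).2.2.getD x false = true) := by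
  induction L with
  | nil =>
    intro rel qu vis h
    exact ⟨h, by simp, rfl, fun x hx => hx⟩
  | cons r L ih =>
    intro rel qu vis h
    have hLr : r ∈ (gBuild nodes edges).getD q [] := hL r (List.mem_cons_self)
    have hL' : ∀ y ∈ L, y ∈ (gBuild nodes edges).getD q [] :=
      fun y hy => hL y (List.mem_cons_of_mem _ hy)
    obtain ⟨h1, h2, h3, h4, h5, h6, h7, h8, h9⟩ := h
    rw [List.foldl_cons]
    by_cases hm : vis.getD r false = false
    · -- r is freshly discovered
      have hrrel : r ∉ rel := fun hr => by
        rw [(h2 r).mpr (Or.inr (Or.inr hr))] at hm; cases hm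
      have hrc : r ≠ c := fun hrc => by
        rw [(h2 r).mpr (Or.inr (Or.inl hrc))] at hm; cases hm
      have hrM0 : vis0.getD r false = false := by
        cases hv0 : vis0.getD r false
        · rfl
        · rw [(h2 r).mpr (Or.inl hv0)] at hm; cases hm
      have hradd : PySem.Set.add rel r = rel ++ [r] := PySem.Set.add_of_not_mem hrrel
      have hrq : r ∉ qu := fun hq' => by
        rcases h6 r hq' with hh | hh
        · exact hrc hh
        · exact hrrel hh
      have hrneq : r ≠ q := fun hh => by
        rcases h8 with hcq | hqrel
        · exact hrc (hh.trans hcq)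
        · exact hrrel (hh ▸ hqrel)
      have hconnr : Conn (gBuild nodes edges) c r := hq.tail hLr
      simp only [hm, if_pos]
      have hinv' : InnerInv (gBuild nodes edges) vis0 c q
          (PySem.Set.add rel r) (qu ++ [r]) (vis.insert r true) := by
        refine ⟨?_, ?_, ?_, ?_, ?_, ?_, ?_, ?_, ?_⟩
        · rw [hradd]
          refine List.Nodup.append h1 (List.nodup_singleton r) ?_
          intro x hx hx'
          rw [List.mem_singleton] at hx'
          exact hrrel (hx' ▸ hx)
        · intro x
          rw [PySem.Dict.getD_insert, hradd]
          by_cases hxr : x = r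
          · simp [hxr]
          · rw [if_neg hxr, h2 x]
            simp only [List.mem_append, List.mem_singleton]
            constructor
            · rintro (hh | hh | hh) <;> tauto
            · rintro (hh | hh | (hh | hh)) <;> tauto
        · rw [hradd]
          simp only [List.mem_append, List.mem_singleton]
          rintro (hh | hh)
          · exact h3 hh
          · exact hrc hh.symm
        · rw [hradd]
          intro x hx
          rcases List.mem_append.mp hx with hh | hh
          · exact h4 x hh
          · rw [List.mem_singleton] at hh
            subst hh
            exact ⟨hconnr, hrM0⟩
        · refine List.Nodup.append h5 (List.nodup_singleton r) ?_
          intro x hx hx'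
          rw [List.mem_singleton] at hx'
          exact hrq (hx' ▸ hx)
        · intro x hx
          rw [hradd]
          simp only [List.mem_append, List.mem_singleton] at hx ⊢
          rcases hx with hh | hh
          · rcases h6 x hh with h' | h' <;> tauto
          · tauto
        · intro hh
          rcases List.mem_append.mp hh with h' | h'
          · exact h7 h'
          · rw [List.mem_singleton] at h'
            exact hrneq h'.symm
        · rw [hradd]
          rcases h8 with hh | hh
          · exact Or.inl hh
          · exact Or.inr (List.mem_append.mpr (Or.inl hh))
        · intro x hx hxqu hxq y hy
          rw [PySem.Dict.getD_insert]
          by_cases hyr : y = r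
          · simp [hyr]
          · rw [if_neg hyr]
            have hxr : x ≠ r := fun hh =>
              hxqu (hh ▸ List.mem_append.mpr (Or.inr (List.mem_singleton.mpr rfl)))
            have hx' : x = c ∨ x ∈ rel := by
              rw [hradd] at hx
              rcases hx with hh | hh
              · exact Or.inl hh
              · rcases List.mem_append.mp hh with h' | h'
                · exact Or.inr h'
                · rw [List.mem_singleton] at h'
                  exact absurd h' hxr
            exact h9 x hx' (fun hh => hxqu (List.mem_append.mpr (Or.inl hh))) hxq y hy
      have hrE : r ∈ EndPts edges := adj_mem_endPts nodes edges q r hLr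
      have hpot := unmarked_insert_true edges vis r hrE hm
      obtain ⟨ih1, ih2, ih3, ih4⟩ := ih hL' (PySem.Set.add rel r) (qu ++ [r]) (vis.insert r true) hinv'
      refine ⟨ih1, ?_, ?_, ?_⟩
      · intro y hy
        rcases List.mem_cons.mp hy with rfl | hy'
        · exact ih4 y (by rw [PySem.Dict.getD_insert_self])
        · exact ih2 y hy'
      · rw [ih3, List.length_append]
        simp only [List.length_singleton]
        omega
      · intro x hx
        apply ih4
        rw [PySem.Dict.getD_insert]
        by_cases hxr : x = r
        · simp [hxr]
        · rw [if_neg hxr]; exact hx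
    · -- r was already visited
      have hm' : vis.getD r false = true := by
        cases hv : vis.getD r false
        · exact absurd hv hm
        · rfl
      simp only [hm', if_neg, Bool.true_eq_false, not_false_eq_true]
      obtain ⟨ih1, ih2, ih3, ih4⟩ := ih hL' rel qu vis ⟨h1, h2, h3, h4, h5, h6, h7, h8, h9⟩
      refine ⟨ih1, ?_, ih3, ih4⟩
      intro y hy
      rcases List.mem_cons.mp hy with rfl | hy'
      · exact ih4 y hm'
      · exact ih2 y hy'

lemma bfs_loop (nodes : List Int) (edges : List (List Int)) (vis0 : PySem.Dict Int Bool) (c : Int) :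
    ∀ (f : Nat) (queue : List Int) (vis : PySem.Dict Int Bool) (rel : PySem.Set Int),
    BfsInv (gBuild nodes edges) vis0 c queue vis rel →
    queue.length + unmarked edges vis ≤ f →
    BfsInv (gBuild nodes edges) vis0 c []
      (bfsLoopA (gBuild nodes edges) f queue vis rel).2
      (bfsLoopA (gBuild nodes edges) f queue vis rel).1 := by
  intro f
  induction f with
  | zero =>
    intro queue vis rel hinv hpot
    have hq : queue = [] := List.eq_nil_of_length_eq_zero (by omega)
    subst hq
    simpa [bfsLoopA] using hinv
  | succ f ih =>
    intro queue vis rel hinv hpot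
    cases queue with
    | nil => simpa [bfsLoopA] using hinv
    | cons q rest =>
      obtain ⟨h1, h2, h3, h4, h5, h6, h7⟩ := hinv
      have hq58 : q = c ∨ q ∈ rel := h6 q (List.mem_cons_self)
      have hconnq : Conn (gBuild nodes edges) c q := by
        rcases hq58 with hh | hh
        · exact hh ▸ Relation.ReflTransGen.refl
        · exact (h4 q hh).1
      have hnc := List.nodup_cons.mp h5
      have hinner := bfs_inner nodes edges vis0 c q ((gBuild nodes edges).getD q [])
        (fun y hy => hy) hconnq rel rest vis
        ⟨h1, h2, h3, h4, hnc.2, fun x hx => h6 x (List.mem_cons_of_mem _ hx), hnc.1, hq58,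
          fun x hx hxrest hxq => h7 x hx (by
            rw [List.mem_cons]
            rintro (hh | hh)
            · exact hxq hh
            · exact hxrest hh)⟩
      obtain ⟨hi1, hi2, hi3, hi4⟩ := hinner
      obtain ⟨j1, j2, j3, j4, j5, j6, _, _, j9⟩ := hi1
      show BfsInv _ _ _ _ (bfsLoopA _ (f+1) (q :: rest) vis rel).2 (bfsLoopA _ (f+1) (q :: rest) vis rel).1
      rw [show bfsLoopA (gBuild nodes edges) (f+1) (q :: rest) vis rel
          = bfsLoopA (gBuild nodes edges) f
            (((gBuild nodes edges).getD q []).foldl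
              (fun (st : PySem.Set Int × List Int × PySem.Dict Int Bool) r =>
                if st.2.2.getD r false = false then
                  (PySem.Set.add st.1 r, st.2.1 ++ [r], st.2.2.insert r true)
                else st) (rel, rest, vis)).2.1
            (((gBuild nodes edges).getD q []).foldl
              (fun (st : PySem.Set Int × List Int × PySem.Dict Int Bool) r =>
                if st.2.2.getD r false = false then
                  (PySem.Set.add st.1 r, st.2.1 ++ [r], st.2.2.insert r true)
                else st) (rel, rest, vis)).2.2
            (((gBuild nodes edges).getD q []).foldl
              (fun (st : PySem.Set Int × List Int × PySem.Dict Int Bool) r =>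
                if st.2.2.getD r false = false then
                  (PySem.Set.add st.1 r, st.2.1 ++ [r], st.2.2.insert r true)
                else st) (rel, rest, vis)).1
          from rfl]
      apply ih
      · refine ⟨j1, j2, j3, j4, j5, j6, ?_⟩
        intro x hx hxqu y hy
        by_cases hxq : x = q
        · subst hxq
          exact hi2 y hy
        · exact j9 x hx hxqu hxq y hy
      · have hlen : (q :: rest).length = rest.length + 1 := rfl
        rw [hlen] at hpot
        omega

-- consequence: full characterization of one BFS round
lemma bfs_round (nodes : List Int) (edges : List (List Int)) (vis0 : PySem.Dict Int Bool) (c : Int)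
    (hM0c : vis0.getD c false = false)
    (hM0cl : ∀ x y, vis0.getD x false = true → y ∈ (gBuild nodes edges).getD x [] →
      vis0.getD y false = true) :
    let g := gBuild nodes edges
    let R := bfsA (nodes.length + 2 * edges.length + 1) c g vis0
    (∀ x, x ∈ PySem.Set.add R.1 c ↔ Conn g c x) ∧
    (PySem.Set.add R.1 c).Nodup ∧
    (∀ x, R.2.getD x false = true ↔ (vis0.getD x false = true ∨ Conn g c x)) := by
  intro g R
  have hinv0 : BfsInv g vis0 c [c] (vis0.insert c true) PySem.Set.empty := by
    refine ⟨List.nodup_nil, ?_, List.not_mem_nil, ?_, List.nodup_singleton c, ?_, ?_⟩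
    · intro x
      rw [PySem.Dict.getD_insert]
      by_cases hxc : x = c
      · simp [hxc]
      · simp [hxc, PySem.Set.empty]
    · intro x hx
      exact absurd hx (List.not_mem_nil)
    · intro x hx
      rw [List.mem_singleton] at hx
      exact Or.inl hx
    · intro x hx hxq
      rcases hx with hh | hh
      · exact absurd (List.mem_singleton.mpr hh) hxq
      · exact absurd hh (List.not_mem_nil)
  have hfuel : [c].length + unmarked edges (vis0.insert c true)
      ≤ nodes.length + 2 * edges.length + 1 := by
    have h1 := unmarked_insert_le edges vis0 c
    have h2 := unmarked_le edges vis0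
    simp only [List.length_singleton]
    omega
  have hfinal := bfs_loop nodes edges vis0 c (nodes.length + 2 * edges.length + 1)
    [c] (vis0.insert c true) PySem.Set.empty hinv0 hfuel
  have hR : R = bfsLoopA g (nodes.length + 2 * edges.length + 1)
      [c] (vis0.insert c true) PySem.Set.empty := rfl
  rw [← hR] at hfinal
  obtain ⟨f1, f2, f3, f4, _, _, f7⟩ := hfinal
  have hM0conn : ∀ x, Conn g c x → vis0.getD x false = false := by
    intro x hconn
    induction hconn with
    | refl => exact hM0c
    | tail _ hadj ihc =>
      rename_i b y _
      cases hv : vis0.getD y false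
      · rfl
      · have hb := hM0cl y b hv (adj_symm nodes edges b y hadj)
        rw [ihc] at hb
        cases hb
  have hmarked_closed : ∀ x y, R.2.getD x false = true → y ∈ g.getD x [] →
      R.2.getD y false = true := by
    intro x y hx hy
    rcases (f2 x).mp hx with hM | hcx
    · exact (f2 y).mpr (Or.inl (hM0cl x y hM hy))
    · exact f7 x hcx (List.not_mem_nil) y hy
  have hconn_marked : ∀ x, Conn g c x → R.2.getD x false = true := by
    intro x hconn
    induction hconn with
    | refl => exact (f2 c).mpr (Or.inr (Or.inl rfl))
    | tail _ hadj ihc =>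
      exact hmarked_closed _ _ ihc hadj
  refine ⟨?_, ?_, ?_⟩
  · intro x
    rw [PySem.Set.mem_add]
    constructor
    · rintro (hh | hh)
      · exact (f4 x hh).1
      · exact hh ▸ Relation.ReflTransGen.refl
    · intro hconn
      have hm := hconn_marked x hconn
      rcases (f2 x).mp hm with hM | hc | hrel
      · rw [hM0conn x hconn] at hM
        cases hM
      · exact Or.inr hc
      · exact Or.inl hrel
  · rw [PySem.Set.add_of_not_mem f3]
    refine List.Nodup.append f1 (List.nodup_singleton c) ?_
    intro x hx hx'
    rw [List.mem_singleton] at hx'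
    exact f3 (hx' ▸ hx)
  · intro x
    constructor
    · intro hx
      rcases (f2 x).mp hx with hM | hc | hrel
      · exact Or.inl hM
      · exact Or.inr (hc ▸ Relation.ReflTransGen.refl)
      · exact Or.inr (f4 x hrel).1
    · rintro (hh | hh)
      · exact (f2 x).mpr (Or.inl hh)
      · exact hconn_marked x hh

-- quick-find union-find --------------------------------------------------------

def labv (lab : PySem.Dict Int Int) (x : Int) : Int := lab.getD x x

def dsuStep (lab : PySem.Dict Int Int) (e : List Int) : PySem.Dict Int Int :=
  match PySem.List.pyGet? e 0 with
  | none => lab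
  | some a =>
    match PySem.List.pyGet? e 1 with
    | none => lab
    | some b =>
      match lab.get? a with
      | none => lab
      | some ra =>
        match lab.get? b with
        | none => lab
        | some rb =>
          if ra ≠ rb then
            PySem.Dict.ofList (lab.items.map (fun kv => (kv.1, if kv.2 = rb then ra else kv.2)))
          else lab

-- reduction equations for dsuStep
lemma dsuStep_stuck0 (lab : PySem.Dict Int Int) (e : List Int)
    (h0 : PySem.List.pyGet? e 0 = none) : dsuStep lab e = lab := by
  simp [dsuStep, h0]
lemma dsuStep_stuck1 (lab : PySem.Dict Int Int) (e : List Int) (a : Int)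
    (h0 : PySem.List.pyGet? e 0 = some a) (h1 : PySem.List.pyGet? e 1 = none) :
    dsuStep lab e = lab := by
  simp [dsuStep, h0, h1]
lemma dsuStep_stucka (lab : PySem.Dict Int Int) (e : List Int) (a b : Int)
    (h0 : PySem.List.pyGet? e 0 = some a) (h1 : PySem.List.pyGet? e 1 = some b)
    (ha : lab.get? a = none) : dsuStep lab e = lab := by
  simp [dsuStep, h0, h1, ha]
lemma dsuStep_stuckb (lab : PySem.Dict Int Int) (e : List Int) (a b ra : Int)
    (h0 : PySem.List.pyGet? e 0 = some a) (h1 : PySem.List.pyGet? e 1 = some b)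
    (ha : lab.get? a = some ra) (hb : lab.get? b = none) : dsuStep lab e = lab := by
  simp [dsuStep, h0, h1, ha, hb]
lemma dsuStep_same (lab : PySem.Dict Int Int) (e : List Int) (a b ra rb : Int)
    (h0 : PySem.List.pyGet? e 0 = some a) (h1 : PySem.List.pyGet? e 1 = some b)
    (ha : lab.get? a = some ra) (hb : lab.get? b = some rb) (hrr : ra = rb) :
    dsuStep lab e = lab := by
  simp [dsuStep, h0, h1, ha, hb, hrr]
lemma dsuStep_union (lab : PySem.Dict Int Int) (e : List Int) (a b ra rb : Int)
    (h0 : PySem.List.pyGet? e 0 = some a) (h1 : PySem.List.pyGet? e 1 = some b)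
    (ha : lab.get? a = some ra) (hb : lab.get? b = some rb) (hne : ra ≠ rb) :
    dsuStep lab e
      = PySem.Dict.ofList (lab.items.map (fun kv => (kv.1, if kv.2 = rb then ra else kv.2))) := by
  simp [dsuStep, h0, h1, ha, hb, hne]

-- value-map rebuild of a dict with Nodup keys
lemma mapVal_items (lab : PySem.Dict Int Int) (h : lab.keys.Nodup) (f : Int → Int) :
    (PySem.Dict.ofList (lab.items.map (fun kv => (kv.1, f kv.2)))).items
      = lab.items.map (fun kv => (kv.1, f kv.2)) := by
  show (PySem.Dict.update PySem.Dict.empty _).items = _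
  rw [PySem.Dict.update]
  have hnd : ((lab.items.map (fun kv : Int × Int => (kv.1, f kv.2))).map Prod.fst).Nodup := by
    rw [List.map_map]
    simpa [Function.comp, PySem.Dict.keys] using h
  have := PySem.Dict.items_foldl_insert_fresh
    (l := lab.items.map (fun kv => (kv.1, f kv.2))) (k := Prod.fst) (v := Prod.snd)
    (d := PySem.Dict.empty) (fun a _ => PySem.Dict.contains_empty a.1) hnd
  simpa using this

lemma mapVal_keys (lab : PySem.Dict Int Int) (h : lab.keys.Nodup) (f : Int → Int) :
    (PySem.Dict.ofList (lab.items.map (fun kv => (kv.1, f kv.2)))).keys = lab.keys := by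
  show (PySem.Dict.ofList (lab.items.map (fun kv => (kv.1, f kv.2)))).items.map (·.1)
      = lab.items.map (·.1)
  rw [mapVal_items lab h f, List.map_map]
  rfl

lemma mapVal_get? (lab : PySem.Dict Int Int) (h : lab.keys.Nodup) (f : Int → Int) (x : Int) :
    (PySem.Dict.ofList (lab.items.map (fun kv => (kv.1, f kv.2)))).get? x
      = (lab.get? x).map f := by
  have hk : (PySem.Dict.ofList (lab.items.map (fun kv => (kv.1, f kv.2)))).keys = lab.keys :=
    mapVal_keys lab h f
  cases hx : lab.get? x with
  | none =>
    rw [PySem.Dict.get?_eq_none_iff_not_mem_keys] at hx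
    simp only [Option.map_none]
    rw [PySem.Dict.get?_eq_none_iff_not_mem_keys, hk]
    exact hx
  | some v =>
    have hmem := PySem.Dict.mem_items_of_get?_eq_some lab hx
    have hmem' : (x, f v) ∈ (PySem.Dict.ofList (lab.items.map (fun kv => (kv.1, f kv.2)))).items := by
      rw [mapVal_items lab h f]
      exact List.mem_map.mpr ⟨(x, v), hmem, rfl⟩
    rw [PySem.Dict.get?_of_mem_items _ hmem' (hk ▸ h)]
    rfl

-- beta-instantiated forms for the union's relabel function
lemma mapVal_keys' (lab : PySem.Dict Int Int) (h : lab.keys.Nodup) (ra rb : Int) :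
    (PySem.Dict.ofList (lab.items.map
      (fun kv => (kv.1, if kv.2 = rb then ra else kv.2)))).keys = lab.keys :=
  mapVal_keys lab h (fun v => if v = rb then ra else v)

lemma mapVal_get?' (lab : PySem.Dict Int Int) (h : lab.keys.Nodup) (ra rb x : Int) :
    (PySem.Dict.ofList (lab.items.map
      (fun kv => (kv.1, if kv.2 = rb then ra else kv.2)))).get? x
      = (lab.get? x).map (fun v => if v = rb then ra else v) :=
  mapVal_get? lab h (fun v => if v = rb then ra else v) x

-- DSU invariant: keys are the graph keys, values are keys connected to their key
def DsuInv (nodes : List Int) (edges : List (List Int)) (lab : PySem.Dict Int Int) : Prop :=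
  lab.keys = (gBuild nodes edges).keys ∧
  (∀ x v, lab.get? x = some v → v ∈ (gBuild nodes edges).keys ∧ Conn (gBuild nodes edges) x v)

lemma dsu_get?_isSome (nodes : List Int) (edges : List (List Int)) (lab : PySem.Dict Int Int)
    (h : DsuInv nodes edges lab) (x : Int) (hx : x ∈ (gBuild nodes edges).keys) :
    ∃ v, lab.get? x = some v := by
  cases hv : lab.get? x with
  | none =>
    rw [PySem.Dict.get?_eq_none_iff_not_mem_keys, h.1] at hv
    exact absurd hx hv
  | some v => exact ⟨v, rfl⟩

lemma dsu_keys_nodup (nodes : List Int) (edges : List (List Int)) (lab : PySem.Dict Int Int)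
    (h : DsuInv nodes edges lab) : lab.keys.Nodup := by
  rw [h.1]; exact nodup_keys_gBuild nodes edges

lemma dsuInv_step (nodes : List Int) (edges : List (List Int)) (lab : PySem.Dict Int Int)
    (e : List Int) (he : e ∈ edges) (h : DsuInv nodes edges lab) :
    DsuInv nodes edges (dsuStep lab e) := by
  have hnd := dsu_keys_nodup nodes edges lab h
  cases h0 : PySem.List.pyGet? e 0 with
  | none => rw [dsuStep_stuck0 lab e h0]; exact h
  | some a =>
  cases h1 : PySem.List.pyGet? e 1 with
  | none => rw [dsuStep_stuck1 lab e a h0 h1]; exact h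
  | some b =>
  cases ha : lab.get? a with
  | none => rw [dsuStep_stucka lab e a b h0 h1 ha]; exact h
  | some ra =>
  cases hb : lab.get? b with
  | none => rw [dsuStep_stuckb lab e a b ra h0 h1 ha hb]; exact h
  | some rb =>
  by_cases hne : ra = rb
  · rw [dsuStep_same lab e a b ra rb h0 h1 ha hb hne]; exact h
  · rw [dsuStep_union lab e a b ra rb h0 h1 ha hb hne]
    constructor
    · rw [mapVal_keys' lab hnd]; exact h.1
    · intro x v hv
      rw [mapVal_get?' lab hnd] at hv
      cases hx : lab.get? x with
      | none => rw [hx] at hv; exact absurd hv (by simp)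
      | some w =>
        rw [hx] at hv
        have hw := h.2 x w hx
        have hra := h.2 a ra ha
        have hrb := h.2 b rb hb
        have hv' : v = if w = rb then ra else w := by
          simpa using hv.symm
        by_cases hwrb : w = rb
        · subst hwrb
          rw [if_pos rfl] at hv'
          subst hv'
          refine ⟨hra.1, ?_⟩
          have hba : Conn (gBuild nodes edges) b a :=
            Relation.ReflTransGen.single
              ((mem_gBuild nodes edges b a).mpr ⟨e, he, Or.inr ⟨h0, h1⟩⟩)
          exact hw.2.trans ((conn_symm nodes edges _ _ hrb.2).trans
            (hba.trans hra.2))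
        · rw [if_neg hwrb] at hv'
          subst hv'
          exact hw

lemma dsuStep_labv (nodes : List Int) (edges : List (List Int)) (lab : PySem.Dict Int Int)
    (e : List Int) (h : DsuInv nodes edges lab) :
    ∃ F : Int → Int, ∀ x, labv (dsuStep lab e) x = F (labv lab x) := by
  have hnd := dsu_keys_nodup nodes edges lab h
  cases h0 : PySem.List.pyGet? e 0 with
  | none => rw [dsuStep_stuck0 lab e h0]; exact ⟨id, fun x => rfl⟩
  | some a =>
  cases h1 : PySem.List.pyGet? e 1 with
  | none => rw [dsuStep_stuck1 lab e a h0 h1]; exact ⟨id, fun x => rfl⟩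
  | some b =>
  cases ha : lab.get? a with
  | none => rw [dsuStep_stucka lab e a b h0 h1 ha]; exact ⟨id, fun x => rfl⟩
  | some ra =>
  cases hb : lab.get? b with
  | none => rw [dsuStep_stuckb lab e a b ra h0 h1 ha hb]; exact ⟨id, fun x => rfl⟩
  | some rb =>
  by_cases hne : ra = rb
  · rw [dsuStep_same lab e a b ra rb h0 h1 ha hb hne]; exact ⟨id, fun x => rfl⟩
  · rw [dsuStep_union lab e a b ra rb h0 h1 ha hb hne]
    refine ⟨fun v => if v = rb then ra else v, fun x => ?_⟩
    cases hx : lab.get? x with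
    | none =>
      have hxk : x ∉ lab.keys := (PySem.Dict.get?_eq_none_iff_not_mem_keys lab x).mp hx
      have hxv : labv lab x = x := by
        unfold labv; exact PySem.Dict.getD_of_get?_eq_none lab _ hx
      have hx' : (PySem.Dict.ofList (lab.items.map
          (fun kv => (kv.1, if kv.2 = rb then ra else kv.2)))).get? x = none := by
        rw [mapVal_get?' lab hnd, hx]; rfl
      have hxv' : labv (PySem.Dict.ofList (lab.items.map
          (fun kv => (kv.1, if kv.2 = rb then ra else kv.2)))) x = x := by
        unfold labv; exact PySem.Dict.getD_of_get?_eq_none _ _ hx'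
      have hrbk : rb ∈ lab.keys := by
        rw [h.1]; exact (h.2 b rb hb).1
      have hxrb : x ≠ rb := fun hh => hxk (hh ▸ hrbk)
      rw [hxv', hxv]
      simp [hxrb]
    | some w =>
      have hxv : labv lab x = w := by
        unfold labv; exact PySem.Dict.getD_of_get?_eq_some lab _ hx
      have hx' : (PySem.Dict.ofList (lab.items.map
          (fun kv => (kv.1, if kv.2 = rb then ra else kv.2)))).get? x
          = some (if w = rb then ra else w) := by
        rw [mapVal_get?' lab hnd, hx]; rfl
      have hxv' : labv (PySem.Dict.ofList (lab.items.map
          (fun kv => (kv.1, if kv.2 = rb then ra else kv.2)))) x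
          = (if w = rb then ra else w) := by
        unfold labv; exact PySem.Dict.getD_of_get?_eq_some _ _ hx'
      rw [hxv', hxv]

lemma dsuStep_edge_eq (nodes : List Int) (edges : List (List Int)) (lab : PySem.Dict Int Int)
    (e : List Int) (he : e ∈ edges) (h : DsuInv nodes edges lab) (a b : Int)
    (h0 : PySem.List.pyGet? e 0 = some a) (h1 : PySem.List.pyGet? e 1 = some b) :
    labv (dsuStep lab e) a = labv (dsuStep lab e) b := by
  have hnd := dsu_keys_nodup nodes edges lab h
  have hak : a ∈ (gBuild nodes edges).keys :=
    endpoint_mem_keys nodes edges a b ⟨e, he, Or.inl ⟨h0, h1⟩⟩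
  have hbk : b ∈ (gBuild nodes edges).keys :=
    endpoint_mem_keys nodes edges b a ⟨e, he, Or.inr ⟨h0, h1⟩⟩
  obtain ⟨ra, ha⟩ := dsu_get?_isSome nodes edges lab h a hak
  obtain ⟨rb, hb⟩ := dsu_get?_isSome nodes edges lab h b hbk
  by_cases hne : ra = rb
  · rw [dsuStep_same lab e a b ra rb h0 h1 ha hb hne]
    unfold labv
    rw [PySem.Dict.getD_of_get?_eq_some _ _ ha, PySem.Dict.getD_of_get?_eq_some _ _ hb, hne]
  · rw [dsuStep_union lab e a b ra rb h0 h1 ha hb hne]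
    have ha' : (PySem.Dict.ofList (lab.items.map
        (fun kv => (kv.1, if kv.2 = rb then ra else kv.2)))).get? a
        = some (if ra = rb then ra else ra) := by
      rw [mapVal_get?' lab hnd, ha]; rfl
    have hb' : (PySem.Dict.ofList (lab.items.map
        (fun kv => (kv.1, if kv.2 = rb then ra else kv.2)))).get? b
        = some (if rb = rb then ra else rb) := by
      rw [mapVal_get?' lab hnd, hb]; rfl
    unfold labv
    rw [PySem.Dict.getD_of_get?_eq_some _ _ ha', PySem.Dict.getD_of_get?_eq_some _ _ hb']
    simp

lemma dsuInv_fold (nodes : List Int) (edges : List (List Int)) :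
    ∀ (es : List (List Int)) (lab : PySem.Dict Int Int), (∀ e ∈ es, e ∈ edges) →
    DsuInv nodes edges lab → DsuInv nodes edges (es.foldl dsuStep lab) := by
  intro es
  induction es with
  | nil => intro lab _ h; exact h
  | cons e es ih =>
    intro lab hmem h
    exact ih _ (fun e' he' => hmem e' (List.mem_cons_of_mem _ he'))
      (dsuInv_step nodes edges lab e (hmem e (List.mem_cons_self)) h)

-- equal labels are preserved by every later union, and each processed edge's
-- endpoints end up with equal labels
lemma dsu_pointwise (nodes : List Int) (edges : List (List Int)) :
    ∀ (es : List (List Int)) (lab : PySem.Dict Int Int), (∀ e ∈ es, e ∈ edges) →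
    DsuInv nodes edges lab →
    (∀ u v, labv lab u = labv lab v →
      labv (es.foldl dsuStep lab) u = labv (es.foldl dsuStep lab) v) ∧
    (∀ e ∈ es, ∀ a b, PySem.List.pyGet? e 0 = some a → PySem.List.pyGet? e 1 = some b →
      labv (es.foldl dsuStep lab) a = labv (es.foldl dsuStep lab) b) := by
  intro es
  induction es with
  | nil => intro lab _ _; exact ⟨fun u v h => h, fun e he => absurd he (List.not_mem_nil)⟩
  | cons e es ih =>
    intro lab hmem hinv
    have he : e ∈ edges := hmem e (List.mem_cons_self)
    have hinv1 := dsuInv_step nodes edges lab e he hinv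
    have hmem' : ∀ e' ∈ es, e' ∈ edges := fun e' he' => hmem e' (List.mem_cons_of_mem _ he')
    have ihh := ih (dsuStep lab e) hmem' hinv1
    -- one step maps labels through a function
    have hstep : ∀ u v, labv lab u = labv lab v → labv (dsuStep lab e) u = labv (dsuStep lab e) v := by
      have hF := dsuStep_labv nodes edges lab e hinv
      obtain ⟨F, hF⟩ := hF
      intro u v h
      rw [hF u, hF v, h]
    constructor
    · intro u v h
      rw [List.foldl_cons]
      exact (ihh.1) u v (hstep u v h)
    · intro e' he' a b h0 h1
      rcases List.mem_cons.mp he' with rfl | he'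
      · rw [List.foldl_cons]
        exact (ihh.1) a b (dsuStep_edge_eq nodes edges lab e' he hinv a b h0 h1)
      · rw [List.foldl_cons]
        exact (ihh.2) e' he' a b h0 h1

-- final DSU characterization
lemma dsu_char (nodes : List Int) (edges : List (List Int)) :
    let lab := edges.foldl dsuStep
      (PySem.Dict.ofList ((gBuild nodes edges).keys.map (fun v => (v, v))))
    DsuInv nodes edges lab ∧
    (∀ x y, labv lab x = labv lab y ↔ Conn (gBuild nodes edges) x y) := by
  intro lab
  have hK := nodup_keys_gBuild nodes edges
  have hinv0 : DsuInv nodes edges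
      (PySem.Dict.ofList ((gBuild nodes edges).keys.map (fun v => (v, v)))) := by
    have hitems : (PySem.Dict.ofList ((gBuild nodes edges).keys.map (fun v => (v, v)))).items
        = (gBuild nodes edges).keys.map (fun v => (v, v)) := by
      show (PySem.Dict.update PySem.Dict.empty _).items = _
      rw [PySem.Dict.update]
      have := PySem.Dict.items_foldl_insert_fresh
        (l := (gBuild nodes edges).keys.map (fun v => (v, v))) (k := Prod.fst) (v := Prod.snd)
        (d := PySem.Dict.empty) (fun a _ => PySem.Dict.contains_empty a.1)
        (by rw [List.map_map]
            have hcomp : ((Prod.fst ∘ fun v : Int => (v, v))) = fun v => v := rfl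
            rw [hcomp]
            simpa using hK)
      simpa using this
    have hkeys : (PySem.Dict.ofList ((gBuild nodes edges).keys.map (fun v => (v, v)))).keys
        = (gBuild nodes edges).keys := by
      show (PySem.Dict.ofList ((gBuild nodes edges).keys.map (fun v => (v, v)))).items.map (·.1)
          = _
      rw [hitems, List.map_map]
      have hcomp : ((fun p : Int × Int => p.1) ∘ fun v : Int => (v, v)) = fun v => v := rfl
      simp only [Function.comp_def]
      simp
    refine ⟨hkeys, fun x v hv => ?_⟩
    have hmem := PySem.Dict.mem_items_of_get?_eq_some _ hv
    rw [hitems] at hmem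
    obtain ⟨w, hw, hww⟩ := List.mem_map.mp hmem
    obtain ⟨rfl, rfl⟩ : w = x ∧ w = v := by
      constructor <;> [exact congrArg Prod.fst hww; exact congrArg Prod.snd hww]
    exact ⟨hw, Relation.ReflTransGen.refl⟩
  have hfold := dsuInv_fold nodes edges edges _ (fun e he => he) hinv0
  have hpw := dsu_pointwise nodes edges edges _ (fun e he => he) hinv0
  refine ⟨hfold, fun x y => ⟨?_, ?_⟩⟩
  · intro hxy
    have hx : Conn (gBuild nodes edges) x (labv lab x) := by
      cases hv : lab.get? x with
      | none =>
        unfold labv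
        rw [PySem.Dict.getD_of_get?_eq_none lab _ hv]
        exact Relation.ReflTransGen.refl
      | some v =>
        unfold labv
        rw [PySem.Dict.getD_of_get?_eq_some lab _ hv]
        exact (hfold.2 x v hv).2
    have hy : Conn (gBuild nodes edges) y (labv lab y) := by
      cases hv : lab.get? y with
      | none =>
        unfold labv
        rw [PySem.Dict.getD_of_get?_eq_none lab _ hv]
        exact Relation.ReflTransGen.refl
      | some v =>
        unfold labv
        rw [PySem.Dict.getD_of_get?_eq_some lab _ hv]
        exact (hfold.2 y v hv).2
    exact (hxy ▸ hx).trans (conn_symm nodes edges _ _ hy)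
  · intro hconn
    induction hconn with
    | refl => rfl
    | tail _ hadj ih =>
      rename_i b c _
      rw [mem_gBuild] at hadj
      obtain ⟨e, he, hcase⟩ := hadj
      rcases hcase with ⟨h0, h1⟩ | ⟨h0, h1⟩
      · exact ih.trans (hpw.2 e he b c h0 h1)
      · exact ih.trans (hpw.2 e he c b h0 h1).symm

-- the per-component scan of port B -------------------------------------------

lemma scan_fold (g : PySem.Dict Int (List Int)) (lab : PySem.Dict Int Int) (r : Int)
    (l : List Int) :
    l.foldl (fun (sm : Int × Int) k =>
      if lab.get? k = some r then
        (sm.1 + 1, sm.2 + (if PySem.Int.mod k 2 = PySem.Int.mod (((g.getD k []).length : Int)) 2 then 1 else 0))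
      else sm) (0, 0)
    = (((l.filter (fun k => decide (lab.get? k = some r))).length : Int),
        cntM g (l.filter (fun k => decide (lab.get? k = some r)))) := by
  rw [PySem.List.foldl_ite_eq_foldl_filter (fun k => lab.get? k = some r)
    (fun sm k => (sm.1 + 1, sm.2 +
      (if PySem.Int.mod k 2 = PySem.Int.mod (((g.getD k []).length : Int)) 2 then 1 else 0)))]
  have hfun : (fun (sm : Int × Int) (k : Int) => (sm.1 + 1, sm.2 +
      (if PySem.Int.mod k 2 = PySem.Int.mod (((g.getD k []).length : Int)) 2 then 1 else 0)))
      = (fun (sm : Int × Int) (k : Int) => (sm.1 + 1, sm.2 + mInd g k)) := rfl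
  rw [hfun, PySem.List.foldl_prod_mk (f := fun (s : Int) (_ : Int) => s + 1)
    (g := fun (s : Int) (k : Int) => s + mInd g k)]
  rw [Prod.ext_iff]
  constructor
  · dsimp only
    rw [show (fun (s : Int) (_ : Int) => s + 1)
        = (fun (s : Int) (x : Int) => s + (fun _ => (1 : Int)) x) from rfl]
    rw [PySem.List.foldl_add]
    simp
  · dsimp only
    rw [PySem.List.foldl_add _ (mInd g)]
    simp [cntM]

-- the outer loops agree --------------------------------------------------------

lemma outer_fold (nodes : List Int) (edges : List (List Int)) :
    ∀ (ns : List Int) (_ : ∀ v ∈ ns, v ∈ nodes)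
      (vis : PySem.Dict Int Bool) (done : PySem.Set Int) (oa ra : Int),
    (∀ x y, vis.getD x false = true → y ∈ (gBuild nodes edges).getD x [] →
        vis.getD y false = true) →
    (∀ x, vis.getD x false = true ↔
        PySem.Set.contains done (labv (edges.foldl dsuStep
          (PySem.Dict.ofList ((gBuild nodes edges).keys.map (fun v => (v, v))))) x) = true) →
    (ns.foldl (fun (st : PySem.Dict Int Bool × Int × Int) node =>
      if st.1.getD node false = false then
        let bv := bfsA (nodes.length + 2 * edges.length + 1) node (gBuild nodes edges) st.1
        let rel := PySem.Set.add bv.1 node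
        let t := pyTree (gBuild nodes edges) rel
        (bv.2, st.2.1 + t.1, st.2.2 + t.2)
      else st) (vis, oa, ra)).2
    = (ns.foldl (fun (st : PySem.Set Int × Int × Int) v =>
      match (edges.foldl dsuStep
          (PySem.Dict.ofList ((gBuild nodes edges).keys.map (fun v => (v, v))))).get? v with
      | none => st
      | some r =>
        if PySem.Set.contains st.1 r then st
        else
          let sm := (gBuild nodes edges).keys.foldl (fun (sm : Int × Int) k =>
            if (edges.foldl dsuStep
                (PySem.Dict.ofList ((gBuild nodes edges).keys.map (fun v => (v, v))))).get? k = some r then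
              (sm.1 + 1, sm.2 + (if PySem.Int.mod k 2 = PySem.Int.mod ((((gBuild nodes edges).getD k []).length : Int)) 2 then 1 else 0))
            else sm) (0, 0)
          (PySem.Set.add st.1 r,
           st.2.1 + (if sm.2 = 1 then (1 : Int) else 0),
           st.2.2 + (if sm.1 - sm.2 = 1 then (1 : Int) else 0))) (done, oa, ra)).2 := by
  intro ns
  induction ns with
  | nil => intro _ vis done oa ra _ _; rfl
  | cons v ns ih =>
    intro hns vis done oa ra hclosed hchar
    have hdsu := dsu_char nodes edges
    obtain ⟨hinv, hcr⟩ := hdsu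
    have hvnodes : v ∈ nodes := hns v (List.mem_cons_self)
    have hvk : v ∈ (gBuild nodes edges).keys := node_mem_keys nodes edges v hvnodes
    obtain ⟨r, hr⟩ := dsu_get?_isSome nodes edges _ hinv v hvk
    have hrlab : labv (edges.foldl dsuStep
        (PySem.Dict.ofList ((gBuild nodes edges).keys.map (fun v => (v, v))))) v = r := by
      unfold labv
      exact PySem.Dict.getD_of_get?_eq_some _ _ hr
    rw [List.foldl_cons, List.foldl_cons]
    dsimp only
    simp only [hr]
    by_cases hv : vis.getD v false = false
    · -- fresh component: both sides enter their branch
      have hdone : PySem.Set.contains done r = false := by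
        cases hcd : PySem.Set.contains done r
        · rfl
        · have := (hchar v).mpr (by rw [hrlab]; exact hcd)
          rw [this] at hv
          cases hv
      rw [if_pos hv]
      rw [if_neg (show ¬ (PySem.Set.contains done r = true) from fun hc => by rw [hdone] at hc; cases hc)]
      have hround := bfs_round nodes edges vis v hv hclosed
      obtain ⟨p1, p2, p3⟩ := hround
      -- the two per-component lists are a permutation of each other
      have hLbmem : ∀ x, x ∈ (gBuild nodes edges).keys.filter
          (fun k => decide ((edges.foldl dsuStep
            (PySem.Dict.ofList ((gBuild nodes edges).keys.map (fun v => (v, v))))).get? k = some r))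
          ↔ Conn (gBuild nodes edges) v x := by
        intro x
        rw [List.mem_filter]
        constructor
        · rintro ⟨hxk, hcond⟩
          have hcond' := of_decide_eq_true hcond
          have hlx : labv (edges.foldl dsuStep
              (PySem.Dict.ofList ((gBuild nodes edges).keys.map (fun v => (v, v))))) x = r := by
            unfold labv
            exact PySem.Dict.getD_of_get?_eq_some _ _ hcond'
          exact conn_symm nodes edges x v ((hcr x v).mp (by rw [hlx, hrlab]))
        · intro hconn
          have hxk : x ∈ (gBuild nodes edges).keys :=
            conn_mem_keys nodes edges v x hvnodes hconn
          refine ⟨hxk, decide_eq_true ?_⟩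
          obtain ⟨w, hw⟩ := dsu_get?_isSome nodes edges _ hinv x hxk
          have hlx : labv (edges.foldl dsuStep
              (PySem.Dict.ofList ((gBuild nodes edges).keys.map (fun v => (v, v))))) x = w := by
            unfold labv
            exact PySem.Dict.getD_of_get?_eq_some _ _ hw
          have heq : labv (edges.foldl dsuStep
              (PySem.Dict.ofList ((gBuild nodes edges).keys.map (fun v => (v, v))))) x
              = labv (edges.foldl dsuStep
              (PySem.Dict.ofList ((gBuild nodes edges).keys.map (fun v => (v, v))))) v :=
            (hcr x v).mpr (conn_symm nodes edges v x hconn)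
          rw [hw]
          rw [hlx, hrlab] at heq
          rw [heq]
      have hperm : (PySem.Set.add (bfsA (nodes.length + 2 * edges.length + 1) v
            (gBuild nodes edges) vis).1 v).Perm
          ((gBuild nodes edges).keys.filter
            (fun k => decide ((edges.foldl dsuStep
              (PySem.Dict.ofList ((gBuild nodes edges).keys.map (fun v => (v, v))))).get? k = some r))) := by
        refine (List.perm_ext_iff_of_nodup p2 (List.Nodup.filter _ (nodup_keys_gBuild nodes edges))).mpr ?_
        intro x
        rw [p1 x, hLbmem x]
      have hlen := hperm.length_eq
      have hcnt : cntM (gBuild nodes edges)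
            (PySem.Set.add (bfsA (nodes.length + 2 * edges.length + 1) v
              (gBuild nodes edges) vis).1 v)
          = cntM (gBuild nodes edges)
            ((gBuild nodes edges).keys.filter
              (fun k => decide ((edges.foldl dsuStep
                (PySem.Dict.ofList ((gBuild nodes edges).keys.map (fun v => (v, v))))).get? k = some r))) := by
        unfold cntM
        exact (hperm.map (mInd (gBuild nodes edges))).sum_eq
      rw [pyTree_eq, scan_fold]
      dsimp only
      rw [← hcnt, ← hlen]
      apply ih (fun w hw => hns w (List.mem_cons_of_mem _ hw))
      · -- the new visited dict is still adjacency-closed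
        intro x y hx hy
        rcases (p3 x).mp hx with hh | hh
        · exact (p3 y).mpr (Or.inl (hclosed x y hh hy))
        · exact (p3 y).mpr (Or.inr (hh.tail hy))
      · -- visited ↔ root already counted
        intro x
        rw [p3 x]
        constructor
        · rintro (hh | hh)
          · have := (hchar x).mp hh
            rw [PySem.Set.contains_iff] at this ⊢
            exact (PySem.Set.mem_add done r _).mpr (Or.inl this)
          · have heq : labv (edges.foldl dsuStep
                (PySem.Dict.ofList ((gBuild nodes edges).keys.map (fun v => (v, v))))) x = r := by
              rw [← hrlab]
              exact (hcr x v).mpr (conn_symm nodes edges v x hh)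
            rw [PySem.Set.contains_iff]
            exact (PySem.Set.mem_add done r _).mpr (Or.inr heq)
        · intro hh
          rw [PySem.Set.contains_iff] at hh
          rcases (PySem.Set.mem_add done r _).mp hh with hh' | hh'
          · exact Or.inl ((hchar x).mpr ((PySem.Set.contains_iff done _).mpr hh'))
          · right
            rw [← hrlab] at hh'
            exact conn_symm nodes edges x v ((hcr x v).mp hh')
    · -- already-visited component: both sides skip
      have hv' : vis.getD v false = true := by
        cases hvv : vis.getD v false
        · exact absurd hvv hv
        · rfl
      have hdone : PySem.Set.contains done r = true := by
        have := (hchar v).mp hv'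
        rw [hrlab] at this
        exact this
      rw [if_neg (show ¬ (vis.getD v false = false) from by simp [hv'])]
      rw [if_pos hdone]
      exact ih (fun w hw => hns w (List.mem_cons_of_mem _ hw)) vis done oa ra hclosed hchar

-- initial visited dict reads false everywhere
lemma vis_init (ns : List Int) :
    ∀ (d : PySem.Dict Int Bool), (∀ x, d.getD x false = false) →
    ∀ x, (ns.foldl (fun d v => d.insert v false) d).getD x false = false := by
  induction ns with
  | nil => intro d h x; exact h x
  | cons v ns ih =>
    intro d h x
    simp only [List.foldl_cons]
    apply ih
    intro y
    rw [PySem.Dict.getD_insert]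
    by_cases hy : y = v
    · simp [hy]
    · simp [hy, h y]

-- ===== VERDICT (by name: the statement is the Claim_ definition above) =====
theorem solution_spec : Claim_equal_solution := by
  intro nodes edges _ _
  unfold Spec_solution solution solution_alt
  dsimp only []
  rw [graph_build_eq]
  rw [show (edges.foldl (fun g e =>
      match PySem.List.pyGet? e 0, PySem.List.pyGet? e 1 with
      | some a, some b => (g.modify a [] (· ++ [b])).modify b [] (· ++ [a])
      | _, _ => g) (nodes.foldl (fun g v => g.insert v []) PySem.Dict.empty))
      = gBuild nodes edges from rfl]
  rw [show (fun (lab : PySem.Dict Int Int) (e : List Int) =>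
      match PySem.List.pyGet? e 0 with
      | none => lab
      | some a =>
        match PySem.List.pyGet? e 1 with
        | none => lab
        | some b =>
          match lab.get? a with
          | none => lab
          | some ra =>
            match lab.get? b with
            | none => lab
            | some rb =>
              if ra ≠ rb then
                PySem.Dict.ofList (lab.items.map (fun kv => (kv.1, if kv.2 = rb then ra else kv.2)))
              else lab) = dsuStep from rfl]
  have hvis0 : ∀ x, (nodes.foldl (fun d v => d.insert v false) PySem.Dict.empty).getD x false
      = false :=
    vis_init nodes PySem.Dict.empty (fun z => PySem.Dict.getD_empty z false)
  have h := outer_fold nodes edges nodes (fun _ hv => hv)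
    (nodes.foldl (fun d v => d.insert v false) PySem.Dict.empty) PySem.Set.empty 0 0
    (by intro x y hx _
        rw [hvis0 x] at hx
        cases hx)
    (by intro x
        rw [hvis0 x]
        simp [PySem.Set.empty, PySem.Set.contains])
  rw [Prod.ext_iff] at h
  rw [h.1, h.2]
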